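-- pv_equiv track=rewrite | github.com/Alectriciti/comfyui-adaptiveprompts | generator.py | find_next_bracket_span
-- ===== SOURCE A (Python) =====
-- def _find_top_level_dollars(s: str) -> list[int]:
--     """
--     Return indices where top-level '$$' occurs (i.e., not inside nested {...} groups).
--     """
--     indices = []
--     depth = 0
--     i = 0
--     L = len(s)
--     while i < L:
--         c = s[i]
--         if c == "{":
--             depth += 1
--             i += 1
--             continue
--         if c == "}":
--             if depth > 0:
--                 depth -= 1
--             i += 1
--             continue
--         if depth == 0 and s.startswith("$$", i):
--             indices.append(i)
--             i += 2
--             continue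
--         i += 1
--     return indices
--
-- def find_next_bracket_span(text: str):
--     """
--     Parse all bracket spans with a stack and decide which span should be processed next.
--     Preference logic:
--       - If any span has top-level $$ markers and contains nested spans inside its separator region,
--         prefer that span (this prevents nested separators from being pre-resolved).
--       - Otherwise, return the innermost span (max depth), earliest by start.
--     Returns tuple (start_index, end_index) or None.
--     """
--     stack = []
--     spans = []  # list of (start, end, depth)
--     for i, ch in enumerate(text):
--         if ch == "{":
--             stack.append(i)
--         elif ch == "}":
--             if stack:
--                 s = stack.pop()
--                 depth = len(stack) + 1
--                 spans.append((s, i, depth))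
--
--     if not spans:
--         return None
--
--     # look for spans where a nested bracket is inside the top-level separator region
--     candidates = []
--     for s, e, depth in spans:
--         content = text[s+1:e]
--         dollar_idxs = _find_top_level_dollars(content)
--         if len(dollar_idxs) >= 2:
--             idx1 = dollar_idxs[0]
--             idx2 = dollar_idxs[1]
--             # find any nested span whose local start lies inside content[idx1+2:idx2]
--             for ns, ne, nd in spans:
--                 if ns > s and ne < e:
--                     nested_local_start = ns - (s + 1)
--                     if nested_local_start >= idx1 + 2 and nested_local_start < idx2:
--                         candidates.append((s, e, depth))
--                         break
--
--     if candidates: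
--         candidates.sort(key=lambda x: x[0])  # earliest outer bracket first
--         return (candidates[0][0], candidates[0][1])
--
--     # fallback: innermost span
--     max_depth = max(sp[2] for sp in spans)
--     inners = [sp for sp in spans if sp[2] == max_depth]
--     inners.sort(key=lambda x: x[0])
--     return (inners[0][0], inners[0][1])
-- ===== SOURCE B (Python) =====
-- def _first_two_top_dollars(s):
--     """Return (i, j): the first two indices of top-level '$$' in s, or None if fewer than two."""
--     first = None
--     depth = 0
--     i = 0
--     L = len(s)
--     while i < L:
--         c = s[i]
--         if c == "{":
--             depth += 1
--             i += 1
--         elif c == "}":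
--             if depth > 0:
--                 depth -= 1
--             i += 1
--         elif depth == 0 and s.startswith("$$", i):
--             if first is None:
--                 first = i
--             else:
--                 return (first, i)
--             i += 2
--         else:
--             i += 1
--     return None
--
-- def _bisect_left(a, x):
--     # hand-written bisect.bisect_left (A imports nothing, so bisect may not be imported)
--     lo, hi = 0, len(a)
--     while lo < hi:
--         mid = (lo + hi) // 2
--         if a[mid] < x:
--             lo = mid + 1
--         else:
--             hi = mid
--     return lo
--
-- def find_next_bracket_span(text):
--     stack = []
--     spans = []  # (start, end, depth); by stack discipline any span starting inside another ends inside it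
--     for i, ch in enumerate(text):
--         if ch == "{":
--             stack.append(i)
--         elif ch == "}":
--             if stack:
--                 spans.append((stack.pop(), i, len(stack) + 1))
--     if not spans:
--         return None
--     starts = sorted(s for s, _, _ in spans)
--     best = None
--     for s, e, _ in spans:
--         sep = _first_two_top_dollars(text[s + 1:e])
--         if sep is None:
--             continue
--         i1, i2 = sep
--         lo = s + 3 + i1      # global index of the first admissible nested start
--         hi = s + 1 + i2      # exclusive upper bound; < e, so any such start is a nested span
--         j = _bisect_left(starts, lo)
--         if j < len(starts) and starts[j] < hi:
--             if best is None or s < best[0]: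
--                 best = (s, e)
--     if best is not None:
--         return best
--     md = max(d for _, _, d in spans)
--     return min(((s, e) for s, e, d in spans if d == md), key=lambda t: t[0])
-- ===== Notes on version B (the rewrite author's own statement) =====
-- stated objective: alternative
-- what changed: Per-span full scans are replaced by early-exit scans for the first two top-level $$ markers, and the inner loop over all spans is replaced by one sorted list of span starts queried with a hand-written bisect_left (valid because stack discipline makes any span starting strictly inside another end inside it); candidate/innermost selection tracks the minimum directly instead of building and sorting lists.
import Mathlib
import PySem

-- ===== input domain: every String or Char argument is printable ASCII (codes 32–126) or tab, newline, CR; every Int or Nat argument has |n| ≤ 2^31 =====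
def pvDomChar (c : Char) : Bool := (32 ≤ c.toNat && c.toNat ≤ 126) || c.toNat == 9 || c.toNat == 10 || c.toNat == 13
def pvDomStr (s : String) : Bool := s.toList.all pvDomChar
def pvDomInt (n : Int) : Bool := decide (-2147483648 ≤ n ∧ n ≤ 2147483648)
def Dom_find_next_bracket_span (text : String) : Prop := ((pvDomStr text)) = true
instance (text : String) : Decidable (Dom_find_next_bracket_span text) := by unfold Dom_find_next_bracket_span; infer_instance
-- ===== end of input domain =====

-- B replaces A's per-span full scans and inner loop over all spans by early-exit
-- scans and a sorted list of span starts queried with bisect_left (objective: alternative).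

-- ===== PORT A =====
-- the shared first pass: the stack/spans loop 'for i, ch in enumerate(text)'
-- (identical lines in Source A and Source B, ported once; stack as cons-list, push/pop at head)
def pvStep (st : List Int × List (Int × Int × Int)) (p : Int × Char) :
    List Int × List (Int × Int × Int) :=
  if p.2 = '{' then (p.1 :: st.1, st.2)
  else if p.2 = '}' then
    match st.1 with
    | [] => st
    | s :: rest => (rest, st.2 ++ [(s, p.1, (rest.length : Int) + 1)])
  else st

def pvParse (l : List Char) : List Int × List (Int × Int × Int) :=
  (PySem.List.enumerate l).foldl pvStep ([], [])

-- _find_top_level_dollars: the while loop as recursion on the remaining characters,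
-- carrying depth and the current index i; 's.startswith("$$", i)' is the pattern
-- '$' :: '$' :: _ (exact: it inspects s[i] and s[i+1]); 'i += 2' drops both chars.
def pvDollars (l : List Char) (depth : Nat) (idx : Int) : List Int :=
  match l with
  | [] => []
  | '{' :: rest => pvDollars rest (depth + 1) (idx + 1)
  | '}' :: rest => pvDollars rest (if depth > 0 then depth - 1 else depth) (idx + 1)
  | '$' :: '$' :: rest =>
      if depth = 0 then idx :: pvDollars rest depth (idx + 2)
      else pvDollars ('$' :: rest) depth (idx + 1)
  | _ :: rest => pvDollars rest depth (idx + 1)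
  termination_by l.length
  decreasing_by all_goals simp

-- one iteration of A's candidate loop: scan the span's content for top-level $$,
-- then 'for ns, ne, nd in spans: … candidates.append(…); break' = append once if any matches
def pvCandBody (L : List Char) (spans : List (Int × Int × Int))
    (acc : List (Int × Int × Int)) (sp : Int × Int × Int) : List (Int × Int × Int) :=
  match pvDollars (PySem.List.slice L (some (sp.1 + 1)) (some sp.2.1)) 0 0 with
  | i1 :: i2 :: _ =>
      if spans.any (fun q =>
          decide (q.1 > sp.1 ∧ q.2.1 < sp.2.1 ∧
            q.1 - (sp.1 + 1) ≥ i1 + 2 ∧ q.1 - (sp.1 + 1) < i2))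
      then acc ++ [sp] else acc
  | _ => acc

def find_next_bracket_span (text : String) : Option (Int × Int) :=
  let spans := (pvParse text.toList).2
  if spans = [] then none
  else
    let candidates := spans.foldl (pvCandBody text.toList spans) ([] : List (Int × Int × Int))
    match candidates with
    | c :: cs =>
      -- candidates.sort(key=lambda x: x[0]); candidates[0] (non-empty here)
      match PySem.List.sorted (c :: cs) (fun sp => sp.1) with
      | [] => none
      | x :: _ => some (x.1, x.2.1)
    | [] =>
      match PySem.List.max? (spans.map (fun sp => sp.2.2)) (fun x => x) with
      | none => none   -- unreachable: spans ≠ [] under the guard above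
      | some md =>
        -- inners = [sp for sp in spans if sp[2] == max_depth]; inners.sort(key=x[0]); inners[0]
        match PySem.List.sorted (spans.filter (fun sp : Int × Int × Int => decide (sp.2.2 = md))) (fun sp => sp.1) with
        | [] => none   -- unreachable
        | x :: _ => some (x.1, x.2.1)

-- ===== PORT B =====
-- _first_two_top_dollars: the same while loop, early exit at the second top-level '$$'
def pvFirstTwo (l : List Char) (first : Option Int) (depth : Nat) (idx : Int) :
    Option (Int × Int) :=
  match l with
  | [] => none
  | '{' :: rest => pvFirstTwo rest first (depth + 1) (idx + 1)
  | '}' :: rest => pvFirstTwo rest first (if depth > 0 then depth - 1 else depth) (idx + 1)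
  | '$' :: '$' :: rest =>
      if depth = 0 then
        match first with
        | none => pvFirstTwo rest (some idx) depth (idx + 2)
        | some f => some (f, idx)
      else pvFirstTwo ('$' :: rest) first depth (idx + 1)
  | _ :: rest => pvFirstTwo rest first depth (idx + 1)
  termination_by l.length
  decreasing_by all_goals simp

-- Source B's hand-written _bisect_left is exactly bisect.bisect_left and is ported as
-- the prelude's PySem.List.bisectLeft; 'starts[j]' is in range under the guard
-- 'j < len(starts)', ported as getD.
-- one iteration of B's loop: early-exit scan, then the bisect query and the
-- running-minimum update
def pvBestBody (L : List Char) (starts : List Int)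
    (best : Option (Int × Int)) (sp : Int × Int × Int) : Option (Int × Int) :=
  match pvFirstTwo (PySem.List.slice L (some (sp.1 + 1)) (some sp.2.1)) none 0 0 with
  | none => best
  | some (i1, i2) =>
    if PySem.List.bisectLeft starts (sp.1 + 3 + i1) < starts.length ∧
        starts.getD (PySem.List.bisectLeft starts (sp.1 + 3 + i1)) 0 < sp.1 + 1 + i2 then
      match best with
      | none => some (sp.1, sp.2.1)
      | some b => if sp.1 < b.1 then some (sp.1, sp.2.1) else best
    else best

def find_next_bracket_span_alt (text : String) : Option (Int × Int) :=
  let spans := (pvParse text.toList).2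
  if spans = [] then none
  else
    let starts := PySem.List.sorted (spans.map (fun sp => sp.1)) (fun x => x)
    let best := spans.foldl (pvBestBody text.toList starts) (none : Option (Int × Int))
    match best with
    | some b => some b
    | none =>
      match PySem.List.max? (spans.map (fun sp => sp.2.2)) (fun x => x) with
      | none => none   -- unreachable: spans ≠ [] under the guard above
      | some md =>
        match PySem.List.min?
            ((spans.filter (fun sp : Int × Int × Int => decide (sp.2.2 = md))).map (fun sp => (sp.1, sp.2.1)))
            (fun p => p.1) with
        | none => none   -- unreachable
        | some b => some b

-- ===== PRECONDITION & SPEC =====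
def Spec_find_next_bracket_span (text : String) (out : Option (Int × Int)) : Prop := out = find_next_bracket_span_alt text
instance (text : String) (out : Option (Int × Int)) : Decidable (Spec_find_next_bracket_span text out) := by unfold Spec_find_next_bracket_span; infer_instance

-- ===== CLAIM (what is proved, stated in full; the proofs are below) =====
def Claim_equal_find_next_bracket_span : Prop := ∀ (text : String), Dom_find_next_bracket_span text → Spec_find_next_bracket_span text (find_next_bracket_span text)

-- ===== LEMMAS AND PROOFS =====

-- the early-exit scan returns exactly the first two indices of the full scan
theorem pvFirstTwo_eq_dollars (l : List Char) (depth : Nat) (idx : Int) :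
    ∀ first : Option Int,
      pvFirstTwo l first depth idx =
        match first with
        | none => (match pvDollars l depth idx with
                   | a :: b :: _ => some (a, b)
                   | _ => none)
        | some f => (match pvDollars l depth idx with
                     | b :: _ => some (f, b)
                     | _ => none) := by
  induction l, depth, idx using pvDollars.induct with
  | case1 depth idx => intro first; cases first <;> simp [pvFirstTwo, pvDollars]
  | case2 depth idx rest ih =>
      intro first; rw [pvFirstTwo.eq_2, pvDollars.eq_2]; exact ih first
  | case3 depth idx rest ih =>
      intro first; rw [pvFirstTwo.eq_3, pvDollars.eq_3]; exact ih first
  | case4 idx rest ih =>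
      intro first
      cases first with
      | none =>
          rw [pvFirstTwo.eq_4, pvDollars.eq_4]
          rw [if_pos rfl, ih (some idx)]
          cases h : pvDollars rest 0 (idx + 2) <;> simp
      | some f => rw [pvFirstTwo.eq_5, pvDollars.eq_4]; simp
  | case5 depth idx rest hne ih =>
      intro first
      cases first with
      | none =>
          rw [pvFirstTwo.eq_4, pvDollars.eq_4, if_neg hne, if_neg hne]
          exact ih none
      | some f =>
          rw [pvFirstTwo.eq_5, pvDollars.eq_4, if_neg hne, if_neg hne]
          exact ih (some f)
  | case6 depth idx head rest h1 h2 h3 ih =>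
      intro first
      rw [pvFirstTwo.eq_6 _ _ _ _ _ h1 h2 h3, pvDollars.eq_5 _ _ _ _ h1 h2 h3]
      exact ih first

-- every reported index lies in [idx, idx + l.length - 2]
theorem pvDollars_bounds (l : List Char) (depth : Nat) (idx : Int) :
    ∀ x ∈ pvDollars l depth idx, idx ≤ x ∧ x + 2 ≤ idx + l.length := by
  induction l, depth, idx using pvDollars.induct with
  | case1 depth idx => simp [pvDollars.eq_1]
  | case2 depth idx rest ih =>
      rw [pvDollars.eq_2]; intro x hx
      have h := ih x hx; simp only [List.length_cons] at *; push_cast at *; omega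
  | case3 depth idx rest ih =>
      rw [pvDollars.eq_3]; intro x hx
      have h := ih x hx; simp only [List.length_cons] at *; push_cast at *; omega
  | case4 idx rest ih =>
      rw [pvDollars.eq_4, if_pos rfl]; intro x hx
      rcases List.mem_cons.mp hx with h | h
      · subst h; simp only [List.length_cons]; push_cast; omega
      · have h2 := ih x h; simp only [List.length_cons] at *; push_cast at *; omega
  | case5 depth idx rest hne ih =>
      rw [pvDollars.eq_4, if_neg hne]; intro x hx
      have h := ih x hx; simp only [List.length_cons] at *; push_cast at *; omega
  | case6 depth idx head rest h1 h2 h3 ih =>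
      rw [pvDollars.eq_5 _ _ _ _ h1 h2 h3]; intro x hx
      have h := ih x hx; simp only [List.length_cons] at *; push_cast at *; omega

-- parse-loop invariant: bounds, stack order, stack/span separation, nesting, unique starts
def pvInv (i : Int) (stack : List Int) (spans : List (Int × Int × Int)) : Prop :=
  0 ≤ i ∧
  (∀ t ∈ stack, 0 ≤ t ∧ t < i) ∧
  stack.Pairwise (fun a b => b < a) ∧
  (∀ p ∈ spans, 0 ≤ p.1 ∧ p.1 < p.2.1 ∧ p.2.1 < i) ∧
  (∀ p ∈ spans, ∀ t ∈ stack, t < p.1 ∨ p.2.1 < t) ∧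
  (∀ p ∈ spans, ∀ q ∈ spans, p.1 < q.1 → q.1 < p.2.1 → q.2.1 < p.2.1) ∧
  (∀ p ∈ spans, ∀ q ∈ spans, p.1 = q.1 → p = q)

theorem pvStep_inv {i : Int} {stack : List Int} {spans : List (Int × Int × Int)}
    (h : pvInv i stack spans) (c : Char) :
    pvInv (i + 1) (pvStep (stack, spans) (i, c)).1 (pvStep (stack, spans) (i, c)).2 := by
  obtain ⟨hi, hb, hord, hsb, hsep, hnest, huniq⟩ := h
  have hmono : ∀ (st : List Int) (sp : List (Int × Int × Int)),
      pvInv i st sp → st = stack → sp = spans → pvInv (i+1) st sp := by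
    rintro st sp ⟨hi', hb', hord', hsb', hsep', hnest', huniq'⟩ rfl rfl
    exact ⟨by omega, fun t ht => ⟨(hb' t ht).1, by have := (hb' t ht).2; omega⟩, hord',
      fun p hp => ⟨(hsb' p hp).1, (hsb' p hp).2.1, by have := (hsb' p hp).2.2; omega⟩,
      hsep', hnest', huniq'⟩
  have horig : pvInv i stack spans := ⟨hi, hb, hord, hsb, hsep, hnest, huniq⟩
  by_cases hc1 : c = '{'
  · simp only [pvStep, hc1]
    refine ⟨by omega, ?_, ?_, ?_, ?_, hnest, huniq⟩
    · intro t ht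
      rcases List.mem_cons.mp ht with rfl | ht
      · exact ⟨hi, by omega⟩
      · have := hb t ht; omega
    · exact List.pairwise_cons.mpr ⟨fun t ht => (hb t ht).2, hord⟩
    · intro p hp
      have := hsb p hp; omega
    · intro p hp t ht
      rcases List.mem_cons.mp ht with rfl | ht
      · right; exact (hsb p hp).2.2
      · exact hsep p hp t ht
  · by_cases hc2 : c = '}'
    · rcases hstack : stack with _ | ⟨s, rest⟩
      · subst hstack
        have hred : pvStep (([] : List Int), spans) (i, c) = ([], spans) := by
          simp [pvStep, hc2]
        rw [hred]
        exact hmono _ _ horig rfl rfl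
      · subst hstack
        have hs0 : 0 ≤ s ∧ s < i := hb s List.mem_cons_self
        have hrest : ∀ t ∈ rest, t < s := fun t ht => (List.pairwise_cons.mp hord).1 t ht
        simp only [pvStep, hc2, reduceIte]
        refine ⟨by omega, ?_, (List.pairwise_cons.mp hord).2, ?_, ?_, ?_, ?_⟩
        · intro t ht
          have := hb t (List.mem_cons_of_mem _ ht); omega
        · intro p hp
          rcases List.mem_append.mp hp with hp | hp
          · have := hsb p hp; omega
          · rcases List.mem_singleton.mp hp with rfl
            refine ⟨hs0.1, ?_, ?_⟩ <;> simp only [] <;> omega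
        · intro p hp t ht
          rcases List.mem_append.mp hp with hp | hp
          · exact hsep p hp t (List.mem_cons_of_mem _ ht)
          · rcases List.mem_singleton.mp hp with rfl
            left; simpa using hrest t ht
        · intro p hp q hq
          rcases List.mem_append.mp hp with hp | hp <;>
            rcases List.mem_append.mp hq with hq | hq
          · exact hnest p hp q hq
          · rcases List.mem_singleton.mp hq with rfl
            have := hsep p hp s List.mem_cons_self
            simp only []
            intro h1 h2; omega
          · rcases List.mem_singleton.mp hp with rfl
            have := hsb q hq
            simp only []
            intro h1 h2; omega
          · rcases List.mem_singleton.mp hp with rfl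
            rcases List.mem_singleton.mp hq with rfl
            simp only []
            intro h1; omega
        · intro p hp q hq
          rcases List.mem_append.mp hp with hp | hp <;>
            rcases List.mem_append.mp hq with hq | hq
          · exact huniq p hp q hq
          · rcases List.mem_singleton.mp hq with rfl
            have h1 := hsep p hp s List.mem_cons_self
            have h2 := hsb p hp
            simp only []
            intro h3; omega
          · rcases List.mem_singleton.mp hp with rfl
            have h1 := hsep q hq s List.mem_cons_self
            have h2 := hsb q hq
            simp only []
            intro h3; omega
          · rcases List.mem_singleton.mp hp with rfl
            rcases List.mem_singleton.mp hq with rfl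
            intro _; rfl
    · simp only [pvStep, if_neg hc1, if_neg hc2]
      exact hmono _ _ horig rfl rfl

theorem pvFold_inv (l : List Char) :
    ∀ (i : Int) (stack : List Int) (spans : List (Int × Int × Int)),
      pvInv i stack spans →
      pvInv (i + l.length) ((PySem.List.enumerate l i).foldl pvStep (stack, spans)).1
        ((PySem.List.enumerate l i).foldl pvStep (stack, spans)).2 := by
  induction l with
  | nil => intro i stack spans h; simpa [PySem.List.enumerate_nil] using h
  | cons x xs ih =>
      intro i stack spans h
      rw [PySem.List.enumerate_cons]
      simp only [List.foldl_cons]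
      have h1 := pvStep_inv h x
      have h2 := ih (i + 1) _ _ h1
      rw [show pvStep (stack, spans) (i, x)
            = ((pvStep (stack, spans) (i, x)).1, (pvStep (stack, spans) (i, x)).2) from rfl]
      simp only [List.length_cons]
      have heq : i + ((xs.length : Int) + 1) = i + 1 + xs.length := by ring
      rw [show ((xs.length + 1 : Nat) : Int) = (xs.length : Int) + 1 by push_cast; ring, heq]
      exact h2

theorem pvParse_inv (l : List Char) :
    pvInv (l.length : Int) (pvParse l).1 (pvParse l).2 := by
  have h0 : pvInv 0 ([] : List Int) ([] : List (Int × Int × Int)) := by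
    refine ⟨le_refl 0, ?_, ?_, ?_, ?_, ?_, ?_⟩ <;> simp
  simpa using pvFold_inv l 0 [] [] h0

-- bisect_left on a sorted list answers the "is there an element in [lo, hi)?" query
theorem pvBisect_range_iff (a : List Int) (ha : a.Pairwise (· ≤ ·)) (lo hi : Int) :
    (PySem.List.bisectLeft a lo < a.length ∧ a.getD (PySem.List.bisectLeft a lo) 0 < hi) ↔
      ∃ v ∈ a, lo ≤ v ∧ v < hi := by
  obtain ⟨hle, hlt, hge⟩ := PySem.List.bisectLeft_spec a lo ha
  set j := PySem.List.bisectLeft a lo with hj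
  have hmono : ∀ (p q : Nat) (hp : p < a.length) (hq : q < a.length), p ≤ q → a[p] ≤ a[q] := by
    intro p q hp hq hpq
    rcases eq_or_lt_of_le hpq with rfl | hlt'
    · exact le_refl _
    · exact (List.pairwise_iff_getElem.mp ha) p q hp hq hlt'
  constructor
  · rintro ⟨hjl, hd⟩
    refine ⟨a[j], List.getElem_mem hjl, hge j hjl (le_refl j), ?_⟩
    rwa [List.getD_eq_getElem a 0 hjl] at hd
  · rintro ⟨v, hv, hlov, hvhi⟩
    obtain ⟨k, hk, rfl⟩ := List.mem_iff_getElem.mp hv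
    have hjk : j ≤ k := by
      by_contra hcon
      push Not at hcon
      exact absurd (hlt k hk hcon) (by omega)
    have hjl : j < a.length := lt_of_le_of_lt hjk hk
    refine ⟨hjl, ?_⟩
    rw [List.getD_eq_getElem a 0 hjl]
    exact lt_of_le_of_lt (hmono j k hjl hk hjk) hvhi

-- B's running-minimum update (the inner match of B's loop), as a named function
def pvFmin (best : Option (Int × Int)) (sp : Int × Int × Int) : Option (Int × Int) :=
  match best with
  | none => some (sp.1, sp.2.1)
  | some b => if sp.1 < b.1 then some (sp.1, sp.2.1) else best

theorem pvMinFold_spec (l : List (Int × Int × Int)) :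
    ∀ b : Int × Int,
      ∃ c, l.foldl pvFmin (some b) = some c ∧
        (c = b ∨ ∃ sp ∈ l, c = (sp.1, sp.2.1)) ∧ c.1 ≤ b.1 ∧ ∀ q ∈ l, c.1 ≤ q.1 := by
  induction l with
  | nil => intro b; exact ⟨b, rfl, Or.inl rfl, le_refl _, by simp⟩
  | cons x xs ih =>
      intro b
      simp only [List.foldl_cons, pvFmin]
      by_cases hx : x.1 < b.1
      · obtain ⟨c, hc, hmem, hle, hall⟩ := ih (x.1, x.2.1)
        rw [if_pos hx]
        refine ⟨c, hc, ?_, by simp only [] at hle; omega, ?_⟩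
        · rcases hmem with rfl | ⟨sp, hsp, rfl⟩
          · exact Or.inr ⟨x, List.mem_cons_self, rfl⟩
          · exact Or.inr ⟨sp, List.mem_cons_of_mem _ hsp, rfl⟩
        · intro q hq
          rcases List.mem_cons.mp hq with rfl | hq
          · simp only [] at hle; omega
          · exact hall q hq
      · obtain ⟨c, hc, hmem, hle, hall⟩ := ih b
        rw [if_neg hx]
        refine ⟨c, hc, ?_, hle, ?_⟩
        · rcases hmem with rfl | ⟨sp, hsp, rfl⟩
          · exact Or.inl rfl
          · exact Or.inr ⟨sp, List.mem_cons_of_mem _ hsp, rfl⟩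
        · intro q hq
          rcases List.mem_cons.mp hq with rfl | hq
          · omega
          · exact hall q hq

-- the common candidate test: the span has two top-level $$ markers and some span
-- starts inside the separator region
def pvP (L : List Char) (spans : List (Int × Int × Int)) (sp : Int × Int × Int) : Bool :=
  match pvDollars (PySem.List.slice L (some (sp.1 + 1)) (some sp.2.1)) 0 0 with
  | i1 :: i2 :: _ =>
      spans.any (fun q => decide (sp.1 + 3 + i1 ≤ q.1 ∧ q.1 < sp.1 + 1 + i2))
  | _ => false

theorem pvContentLen (L : List Char) (s e : Int) (h0 : 0 ≤ s) (hse : s < e)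
    (hen : e ≤ L.length) :
    ((PySem.List.slice L (some (s + 1)) (some e)).length : Int) = e - s - 1 := by
  rw [PySem.List.slice_toNat L (a := s + 1) (b := e) (by omega) (by omega)]
  simp only [List.length_take, List.length_drop]
  omega

-- the minimum-tracking fold over a list with unique starts equals head-of-stable-sort
theorem pvMinFold_eq_sortedHead (S F : List (Int × Int × Int))
    (hsub : ∀ p ∈ F, p ∈ S)
    (huniq : ∀ p ∈ S, ∀ q ∈ S, p.1 = q.1 → p = q)
    (c0 : Int × Int × Int) (cs : List (Int × Int × Int)) (hF : F = c0 :: cs) :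
    F.foldl pvFmin none =
      match PySem.List.sorted F (fun sp => sp.1) with
      | [] => none
      | x :: _ => some (x.1, x.2.1) := by
  subst hF
  rcases hs : PySem.List.sorted (c0 :: cs) (fun sp => sp.1) with _ | ⟨x, t⟩
  · exact absurd ((PySem.List.sorted_eq_nil_iff _ _ _).mp hs) (by simp)
  · have hxmem : x ∈ c0 :: cs := by
      rw [← PySem.List.mem_sorted (key := fun sp => sp.1) (rev := false), hs]
      exact List.mem_cons_self
    have hxmin : ∀ y ∈ c0 :: cs, x.1 ≤ y.1 := PySem.List.key_head_sorted_le _ _ hs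
    simp only [List.foldl_cons]
    rw [show pvFmin none c0 = some (c0.1, c0.2.1) from rfl]
    obtain ⟨c, hc, hmem, hle, hall⟩ := pvMinFold_spec cs (c0.1, c0.2.1)
    rw [hc]
    have hcsel : ∃ sp ∈ c0 :: cs, c = (sp.1, sp.2.1) := by
      rcases hmem with rfl | ⟨sp, hsp, rfl⟩
      · exact ⟨c0, List.mem_cons_self, rfl⟩
      · exact ⟨sp, List.mem_cons_of_mem _ hsp, rfl⟩
    obtain ⟨sp, hsp, rfl⟩ := hcsel
    have hmin : ∀ q ∈ c0 :: cs, sp.1 ≤ q.1 := by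
      intro q hq
      rcases List.mem_cons.mp hq with rfl | hq
      · simpa using hle
      · exact hall q hq
    have hxsp : x = sp := by
      apply huniq x (hsub x hxmem) sp (hsub sp hsp)
      exact le_antisymm (hxmin sp hsp) (hmin x hxmem)
    simp only [hxsp]

-- the fallback (innermost span): head-of-sort versus first minimum
theorem pvFallback_eq (S : List (Int × Int × Int))
    (huniq : ∀ p ∈ S, ∀ q ∈ S, p.1 = q.1 → p = q) :
    (match PySem.List.max? (S.map (fun sp => sp.2.2)) (fun x => x) with
     | none => none
     | some md =>
       match PySem.List.sorted (S.filter (fun sp : Int × Int × Int => decide (sp.2.2 = md))) (fun sp => sp.1) with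
       | [] => none
       | x :: _ => some (x.1, x.2.1)) =
    (match PySem.List.max? (S.map (fun sp => sp.2.2)) (fun x => x) with
     | none => none
     | some md =>
       match PySem.List.min?
           ((S.filter (fun sp : Int × Int × Int => decide (sp.2.2 = md))).map (fun sp : Int × Int × Int => (sp.1, sp.2.1)))
           (fun p => p.1) with
       | none => none
       | some b => some b) := by
  rcases hmax : PySem.List.max? (S.map (fun sp => sp.2.2)) (fun x => x) with _ | md
  · rw [hmax]
  · rw [hmax]
    have hmd : md ∈ S.map (fun sp => sp.2.2) := PySem.List.max?_mem hmax
    obtain ⟨sp0, hsp0, hdep⟩ := List.mem_map.mp hmd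
    have hsp0f : sp0 ∈ S.filter (fun sp : Int × Int × Int => decide (sp.2.2 = md)) :=
      List.mem_filter.mpr ⟨hsp0, by simp [hdep]⟩
    rcases hs : PySem.List.sorted (S.filter (fun sp : Int × Int × Int => decide (sp.2.2 = md)))
        (fun sp => sp.1) with _ | ⟨x, t⟩
    · exact absurd ((PySem.List.sorted_eq_nil_iff _ _ _).mp hs) (by
        intro hnil; rw [hnil] at hsp0f; simp at hsp0f)
    · have hxmem : x ∈ S.filter (fun sp : Int × Int × Int => decide (sp.2.2 = md)) := by
        rw [← PySem.List.mem_sorted (key := fun sp => sp.1) (rev := false), hs]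
        exact List.mem_cons_self
      have hxmin : ∀ y ∈ S.filter (fun sp : Int × Int × Int => decide (sp.2.2 = md)), x.1 ≤ y.1 :=
        PySem.List.key_head_sorted_le _ _ hs
      rcases hmin : PySem.List.min?
          ((S.filter (fun sp : Int × Int × Int => decide (sp.2.2 = md))).map (fun sp : Int × Int × Int => (sp.1, sp.2.1)))
          (fun p => p.1) with _ | b
      · rw [PySem.List.min?_eq_none_iff] at hmin
        simp only [List.map_eq_nil_iff] at hmin
        rw [hmin] at hsp0f; simp at hsp0f
      · have hbm := PySem.List.min?_mem hmin
        obtain ⟨sp, hsp, rfl⟩ := List.mem_map.mp hbm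
        have hbmin := PySem.List.min?_isMin hmin
        have h1 : x.1 ≤ sp.1 := hxmin sp hsp
        have h2 : sp.1 ≤ x.1 := by
          have := hbmin (x.1, x.2.1) (List.mem_map.mpr ⟨x, hxmem, rfl⟩)
          simpa using this
        have hxsp : x = sp :=
          huniq x (List.mem_filter.mp hxmem).1 sp (List.mem_filter.mp hsp).1
            (le_antisymm h1 h2)
        simp only [hs, hmin, hxsp]

-- A's loop body is "append sp if pvP" (uses the parse invariant to drop the
-- redundant 'ns > s' and 'ne < e' conjuncts)
theorem pvCandBody_eq (L : List Char) (spans : List (Int × Int × Int))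
    (hsb : ∀ p ∈ spans, 0 ≤ p.1 ∧ p.1 < p.2.1 ∧ p.2.1 < L.length)
    (hnest : ∀ p ∈ spans, ∀ q ∈ spans, p.1 < q.1 → q.1 < p.2.1 → q.2.1 < p.2.1)
    (sp : Int × Int × Int) (hsp : sp ∈ spans) (acc : List (Int × Int × Int)) :
    pvCandBody L spans acc sp = if pvP L spans sp then acc ++ [sp] else acc := by
  rcases hd : pvDollars (PySem.List.slice L (some (sp.1 + 1)) (some sp.2.1)) 0 0
    with _ | ⟨i1, _ | ⟨i2, r⟩⟩
  · simp [pvCandBody, pvP, hd]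
  · simp [pvCandBody, pvP, hd]
  · simp only [pvCandBody, pvP, hd]
    have hb := hsb sp hsp
    have hlen : ((PySem.List.slice L (some (sp.1 + 1)) (some sp.2.1)).length : Int)
        = sp.2.1 - sp.1 - 1 := pvContentLen L sp.1 sp.2.1 hb.1 hb.2.1 (le_of_lt hb.2.2)
    have hd1 := pvDollars_bounds _ _ _ i1 (by rw [hd]; exact List.mem_cons_self)
    have hd2 := pvDollars_bounds _ _ _ i2
      (by rw [hd]; exact List.mem_cons_of_mem _ List.mem_cons_self)
    rw [hlen] at hd1 hd2
    have hany : spans.any (fun q =>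
          decide (q.1 > sp.1 ∧ q.2.1 < sp.2.1 ∧
            q.1 - (sp.1 + 1) ≥ i1 + 2 ∧ q.1 - (sp.1 + 1) < i2))
        = spans.any (fun q => decide (sp.1 + 3 + i1 ≤ q.1 ∧ q.1 < sp.1 + 1 + i2)) := by
      apply PySem.List.any_congr_mem
      intro q hq
      apply decide_eq_decide.mpr
      constructor
      · rintro ⟨h1, h2, h3, h4⟩; omega
      · rintro ⟨h1, h2⟩
        have hq1 : sp.1 < q.1 := by omega
        have hq2 : q.1 < sp.2.1 := by omega
        exact ⟨hq1, hnest sp hsp q hq hq1 hq2, by omega, by omega⟩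
    rw [hany]

-- B's loop body is "update the running minimum if pvP" (uses sortedness of starts)
theorem pvBestBody_eq (L : List Char) (spans : List (Int × Int × Int))
    (sp : Int × Int × Int) (best : Option (Int × Int)) :
    pvBestBody L (PySem.List.sorted (spans.map (fun sp => sp.1)) (fun x => x)) best sp
      = if pvP L spans sp then pvFmin best sp else best := by
  rcases hd : pvDollars (PySem.List.slice L (some (sp.1 + 1)) (some sp.2.1)) 0 0
    with _ | ⟨i1, _ | ⟨i2, r⟩⟩
  · simp [pvBestBody, pvFirstTwo_eq_dollars, pvP, hd]
  · simp [pvBestBody, pvFirstTwo_eq_dollars, pvP, hd]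
  · simp only [pvBestBody, pvFirstTwo_eq_dollars, pvP, hd]
    have hpair : (PySem.List.sorted (spans.map (fun sp => sp.1)) (fun x => x)).Pairwise
        (· ≤ ·) := PySem.List.sorted_pairwise _ _
    have hrange := pvBisect_range_iff _ hpair (sp.1 + 3 + i1) (sp.1 + 1 + i2)
    have hcond : (PySem.List.bisectLeft
          (PySem.List.sorted (spans.map (fun sp => sp.1)) (fun x => x)) (sp.1 + 3 + i1)
            < (PySem.List.sorted (spans.map (fun sp => sp.1)) (fun x => x)).length ∧
        (PySem.List.sorted (spans.map (fun sp => sp.1)) (fun x => x)).getD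
          (PySem.List.bisectLeft
            (PySem.List.sorted (spans.map (fun sp => sp.1)) (fun x => x)) (sp.1 + 3 + i1)) 0
          < sp.1 + 1 + i2)
        ↔ (spans.any (fun q => decide (sp.1 + 3 + i1 ≤ q.1 ∧ q.1 < sp.1 + 1 + i2)) = true) := by
      rw [hrange, List.any_eq_true]
      constructor
      · rintro ⟨v, hv, h1, h2⟩
        rw [PySem.List.mem_sorted] at hv
        obtain ⟨q, hq, rfl⟩ := List.mem_map.mp hv
        exact ⟨q, hq, decide_eq_true_eq.mpr ⟨h1, h2⟩⟩
      · rintro ⟨q, hq, hdec⟩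
        obtain ⟨h1, h2⟩ := decide_eq_true_eq.mp hdec
        exact ⟨q.1, (PySem.List.mem_sorted _ _ _ _).mpr (List.mem_map.mpr ⟨q, hq, rfl⟩), h1, h2⟩
    exact if_congr hcond rfl rfl

-- ===== VERDICT (by name: the statement is the Claim_ definition above) =====
theorem find_next_bracket_span_spec : Claim_equal_find_next_bracket_span := by
  intro text _dom
  unfold Spec_find_next_bracket_span
  obtain ⟨-, -, -, hsb, -, hnest, huniq⟩ := pvParse_inv text.toList
  simp only [find_next_bracket_span, find_next_bracket_span_alt]
  by_cases hempty : (pvParse text.toList).2 = []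
  · simp [hempty]
  · rw [if_neg hempty, if_neg hempty]
    rw [PySem.List.foldl_congr_mem _ _
          (fun acc sp => if pvP text.toList (pvParse text.toList).2 sp = true
            then acc ++ [sp] else acc) _
          (fun acc sp hsp => pvCandBody_eq text.toList _ hsb hnest sp hsp acc),
        PySem.List.foldl_append_if_eq_filter, List.nil_append]
    rw [PySem.List.foldl_congr_mem _ _
          (fun best sp => if pvP text.toList (pvParse text.toList).2 sp = true
            then pvFmin best sp else best) _
          (fun best sp _ => pvBestBody_eq text.toList _ sp best),
        PySem.List.foldl_if_eq_foldl_filter]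
    rcases hF : List.filter (pvP text.toList (pvParse text.toList).2) (pvParse text.toList).2
      with _ | ⟨c0, cs⟩
    · simp only [List.foldl_nil]
      exact pvFallback_eq _ huniq
    · have hsub : ∀ p ∈ c0 :: cs, p ∈ (pvParse text.toList).2 := by
        intro p hp
        rw [← hF] at hp
        exact (List.mem_filter.mp hp).1
      rw [pvMinFold_eq_sortedHead _ (c0 :: cs) hsub huniq c0 cs rfl]
      rcases hs : PySem.List.sorted (c0 :: cs) (fun sp => sp.1) with _ | ⟨x, t⟩
      · exact absurd ((PySem.List.sorted_eq_nil_iff _ _ _).mp hs) (by simp)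
      · simp only [hs]
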